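-- pv_equiv track=rewrite | github.com/Acreast/leetcode | 1935-MaximumNumberofWordsYouCanType/1935-MaximumNumberofWordsYouCanType.py | canBeTypedWords
-- ===== SOURCE A (Python) =====
-- def canBeTypedWords(text: str, brokenLetters: str) -> int:
--
--     word_arr = text.split(" ")
--     res = 0
--     for word in word_arr:
--         has_broken = False
--         for c in brokenLetters:
--             if c in word:
--                 has_broken = True
--                 break
--
--         if not has_broken:
--             res += 1
--
--     return res
-- ===== SOURCE B (Python) =====
-- def canBeTypedWords(text: str, brokenLetters: str) -> int:
--     broken = set(brokenLetters)
--     res = 0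
--     ok = True
--     for ch in text:
--         if ch == " ":
--             res += ok
--             ok = True
--         elif ch in broken:
--             ok = False
--     return res + ok
-- ===== Notes on version B (the rewrite author's own statement) =====
-- stated objective: alternative
-- what changed: Replaced split-into-words plus a per-word inner scan over brokenLetters with a single character-by-character pass over text that maintains a 'segment still typable' flag and finalizes a word at each space and at the end.
import Mathlib
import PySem

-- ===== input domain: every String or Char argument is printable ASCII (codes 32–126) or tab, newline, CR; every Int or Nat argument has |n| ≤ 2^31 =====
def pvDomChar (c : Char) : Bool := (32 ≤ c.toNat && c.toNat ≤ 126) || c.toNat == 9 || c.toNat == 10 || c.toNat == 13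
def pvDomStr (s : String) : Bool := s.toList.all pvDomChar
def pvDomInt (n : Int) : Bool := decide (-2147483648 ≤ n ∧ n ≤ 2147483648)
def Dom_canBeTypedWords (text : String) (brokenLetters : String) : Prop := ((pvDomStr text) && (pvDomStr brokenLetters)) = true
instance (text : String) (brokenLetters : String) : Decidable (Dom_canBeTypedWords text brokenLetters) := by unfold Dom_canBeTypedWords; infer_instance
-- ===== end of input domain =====

-- B replaces split-into-words plus a per-word inner scan over brokenLetters by a single
-- character pass over text maintaining a 'segment typable' flag (alternative decomposition).


-- ===== PORT A =====
-- the inner 'for c in brokenLetters: if c in word: has_broken = True; break' loop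
def canBeTypedWordsHasBroken (word : List Char) : List Char → Bool
  | [] => false
  | c :: cs => if PySem.Chars.isIn [c] word then true else canBeTypedWordsHasBroken word cs

def canBeTypedWords (text : String) (brokenLetters : String) : Int :=
  let word_arr := PySem.Chars.splitOn text.toList [' ']   -- text.split(" ")
  word_arr.foldl
    (fun res word =>
      if !(canBeTypedWordsHasBroken word brokenLetters.toList) then res + 1 else res)
    0

-- ===== PORT B =====
def canBeTypedWords_alt (text : String) (brokenLetters : String) : Int :=
  let broken := PySem.Set.ofList brokenLetters.toList
  let st := text.toList.foldl
    (fun (p : Int × Bool) ch =>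
      if ch = ' ' then (p.1 + (if p.2 then 1 else 0), true)
      else if PySem.Set.contains broken ch then (p.1, false)
      else p)
    (0, true)
  st.1 + (if st.2 then 1 else 0)

-- ===== PRECONDITION & SPEC =====
def Spec_canBeTypedWords (text : String) (brokenLetters : String) (out : Int) : Prop := out = canBeTypedWords_alt text brokenLetters
instance (text : String) (brokenLetters : String) (out : Int) : Decidable (Spec_canBeTypedWords text brokenLetters out) := by unfold Spec_canBeTypedWords; infer_instance

-- ===== CLAIM (what is proved, stated in full; the proofs are below) =====
def Claim_equal_canBeTypedWords : Prop := ∀ (text : String) (brokenLetters : String), Dom_canBeTypedWords text brokenLetters → Spec_canBeTypedWords text brokenLetters (canBeTypedWords text brokenLetters)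

-- ===== LEMMAS AND PROOFS =====

def pvB2I (b : Bool) : Int := if b then 1 else 0

-- single-pass spec: number of typable segments of l, the current segment's flag being ok
def pvN (bl : List Char) : List Char → Bool → Int
  | [], ok => pvB2I ok
  | c :: r, ok =>
      if c = ' ' then pvB2I ok + pvN bl r true
      else pvN bl r (ok && !(bl.contains c))

-- split of l on a single space, recursively
def pvSegs : List Char → List (List Char)
  | [] => [[]]
  | c :: r =>
      if c = ' ' then [] :: pvSegs r
      else
        match pvSegs r with
        | [] => [[c]]
        | w :: ws => (c :: w) :: ws

def pvConsHead (cur : List Char) : List (List Char) → List (List Char)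
  | [] => []
  | w :: ws => (cur ++ w) :: ws

theorem pvConsHead_nil (xs : List (List Char)) : pvConsHead [] xs = xs := by
  cases xs <;> simp [pvConsHead]

theorem pvSegs_ne_nil (l : List Char) : pvSegs l ≠ [] := by
  cases l with
  | nil => simp [pvSegs]
  | cons c r =>
    simp only [pvSegs]
    split_ifs
    · simp
    · cases h : pvSegs r <;> simp

theorem pvGo_eq (fuel : Nat) : ∀ (l cur : List Char) (acc : List (List Char)),
    l.length < fuel →
    PySem.Chars.splitOn.go [' '] fuel l cur acc = acc.reverse ++ pvConsHead cur.reverse (pvSegs l) := by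
  induction fuel with
  | zero => intro l cur acc h; omega
  | succ n ih =>
    intro l cur acc h
    cases l with
    | nil =>
      simp [PySem.Chars.splitOn.go, pvSegs, pvConsHead]
    | cons c rest =>
      have h1 : rest.length < n := by simp at h; omega
      by_cases hc : c = ' '
      · subst hc
        rw [PySem.Chars.splitOn.go]
        simp only [List.isPrefixOf, beq_self_eq_true, Bool.true_and, List.isPrefixOf_nil_left,
          if_true, List.length_cons, List.length_nil, List.drop_succ_cons, List.drop_zero]
        rw [ih rest [] (cur.reverse :: acc) h1]
        cases hseg : pvSegs rest with
        | nil => exact absurd hseg (pvSegs_ne_nil rest)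
        | cons w ws => simp [pvSegs, hseg, pvConsHead]
      · rw [PySem.Chars.splitOn.go]
        rw [show ([' '].isPrefixOf (c :: rest)) = false by
          simp [List.isPrefixOf]; exact fun hh => absurd hh.symm hc]
        simp only [Bool.false_eq_true, if_false]
        rw [ih rest (c :: cur) acc h1]
        cases hseg : pvSegs rest with
        | nil => exact absurd hseg (pvSegs_ne_nil rest)
        | cons w ws =>
          simp [pvSegs, hc, hseg, pvConsHead]

theorem pvSplitOn_eq (l : List Char) : PySem.Chars.splitOn l [' '] = pvSegs l := by
  unfold PySem.Chars.splitOn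
  rw [pvGo_eq (l.length + 1) l [] [] (by omega)]
  simp [pvConsHead_nil]

theorem pvHasBroken_eq (word bl : List Char) :
    canBeTypedWordsHasBroken word bl = bl.any (fun c => word.contains c) := by
  induction bl with
  | nil => simp [canBeTypedWordsHasBroken]
  | cons c cs ih =>
    simp only [canBeTypedWordsHasBroken, List.any_cons]
    have : PySem.Chars.isIn [c] word = word.contains c := by
      rw [Bool.eq_iff_iff]
      rw [PySem.Chars.isIn_iff_infix, List.singleton_infix_iff]
      simp
    rw [this, ih]
    cases word.contains c <;> simp

theorem pvAny_swap (cur bl : List Char) :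
    bl.any (fun c => cur.contains c) = cur.any (fun c => bl.contains c) := by
  rw [Bool.eq_iff_iff]
  simp only [List.any_eq_true, List.contains_iff_mem]
  exact ⟨fun ⟨x, h1, h2⟩ => ⟨x, h2, h1⟩, fun ⟨x, h1, h2⟩ => ⟨x, h2, h1⟩⟩

theorem pvA_count (bl : List Char) : ∀ (l cur : List Char) (acc : Int),
    (pvConsHead cur (pvSegs l)).foldl
      (fun res word => if !(canBeTypedWordsHasBroken word bl) then res + 1 else res) acc
    = acc + pvN bl l (!(cur.any (fun c => bl.contains c))) := by
  intro l
  induction l with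
  | nil =>
    intro cur acc
    simp only [pvSegs, pvConsHead, List.append_nil, List.foldl_cons, List.foldl_nil,
      pvN, pvB2I, pvHasBroken_eq, pvAny_swap]
    cases h : cur.any (fun c => bl.contains c) <;> simp <;> ring
  | cons c r ih =>
    intro cur acc
    by_cases hc : c = ' '
    · subst hc
      cases hseg : pvSegs r with
      | nil => exact absurd hseg (pvSegs_ne_nil r)
      | cons w ws =>
        have hs2 : pvSegs (' ' :: r) = [] :: w :: ws := by simp [pvSegs, hseg]
        rw [hs2]
        simp only [pvConsHead, List.append_nil]
        rw [List.foldl_cons]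
        have hih := ih [] (if !(canBeTypedWordsHasBroken cur bl) then acc + 1 else acc)
        rw [hseg] at hih
        simp only [pvConsHead, List.nil_append] at hih
        rw [hih]
        have hcur : canBeTypedWordsHasBroken cur bl = cur.any (fun x => bl.contains x) := by
          rw [pvHasBroken_eq, pvAny_swap]
        rw [hcur]
        cases h : cur.any (fun x => bl.contains x) <;> simp [pvN, pvB2I] <;> ring
    · cases hseg : pvSegs r with
      | nil => exact absurd hseg (pvSegs_ne_nil r)
      | cons w ws =>
        have hs2 : pvSegs (c :: r) = (c :: w) :: ws := by simp [pvSegs, hc, hseg]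
        rw [hs2]
        simp only [pvConsHead]
        have hih := ih (cur ++ [c]) acc
        rw [hseg] at hih
        simp only [pvConsHead, List.append_assoc, List.singleton_append] at hih
        rw [hih]
        have harg : (!(cur ++ [c]).any fun x => bl.contains x)
            = ((!cur.any fun x => bl.contains x) && !bl.contains c) := by
          simp [List.any_append]
        rw [harg]
        simp [pvN, hc]

theorem pvB_fold (bl : List Char) : ∀ (l : List Char) (res : Int) (ok : Bool),
    (let st := l.foldl
      (fun (p : Int × Bool) ch =>
        if ch = ' ' then (p.1 + (if p.2 then 1 else 0), true)
        else if PySem.Set.contains (PySem.Set.ofList bl) ch then (p.1, false)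
        else p) (res, ok);
     st.1 + (if st.2 then 1 else 0)) = res + pvN bl l ok := by
  intro l
  induction l with
  | nil => intro res ok; simp [pvN, pvB2I]
  | cons c r ih =>
    intro res ok
    have hcon : PySem.Set.contains (PySem.Set.ofList bl) c = bl.contains c := by
      rw [Bool.eq_iff_iff, PySem.Set.contains_iff, PySem.Set.mem_ofList]
      simp
    by_cases hc : c = ' '
    · subst hc
      simp only [List.foldl_cons, if_pos rfl]
      rw [ih]
      simp [pvN, pvB2I]
      split_ifs <;> ring
    · by_cases hb : c ∈ bl
      · have hb' : bl.contains c = true := by simpa using hb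
        simp only [List.foldl_cons, if_neg hc, hcon, hb', if_pos rfl]
        rw [ih]
        simp [pvN, hc, hb]
      · have hb' : bl.contains c = false := by simpa using hb
        simp only [List.foldl_cons, if_neg hc, hcon, hb', Bool.false_eq_true, if_false]
        rw [ih]
        simp [pvN, hc, hb]

-- ===== VERDICT (by name: the statement is the Claim_ definition above) =====
theorem canBeTypedWords_spec : Claim_equal_canBeTypedWords := by
  intro text brokenLetters _
  unfold Spec_canBeTypedWords canBeTypedWords canBeTypedWords_alt
  rw [pvSplitOn_eq]
  rw [show (pvSegs text.toList) = pvConsHead [] (pvSegs text.toList) by rw [pvConsHead_nil]]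
  rw [pvA_count brokenLetters.toList text.toList [] 0]
  rw [pvB_fold brokenLetters.toList text.toList 0 true]
  simp
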